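-- pv_equiv track=rewrite | github.com/atolat/algorithms-lc | Graphs/zombies-in-a-matrix.py | zombieMatrix
-- ===== SOURCE A (Python) =====
-- from queue import Queue
--
-- def zombieMatrix(grid):
--         """
--         :type grid: List[List[int]]
--         :rtype: int
--         """
--         def getNeighbors(r, c, ROW, COLUMN):
--         # ((up), (left), (down), (right))
--             for nr, nc in ((r-1, c), (r, c-1), (r+1, c), (r, c+1)):
--                 if 0 <= nr < ROW and 0 <= nc < COLUMN:
--                 # use yield to make this function a generator (one time iterable)
--                     yield nr, nc
--
--         # Initialize queue
--         q = Queue()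
--         d = 0
--         ROW = len(grid)
--         COLUMN = len(grid[0])
--
--         # Populate queue with verices -> 2
--         for r, row in enumerate(grid):
--             for c, val in enumerate(row):
--                 if val == 1:
--                     q.put((r,c,0))
--
--         # BFS
--         while q.empty() is False:
--             r,c,d = q.get()
--             for nr, nc in getNeighbors(r,c,ROW,COLUMN):
--                 if grid[nr][nc] == 0:
--                     grid[nr][nc] = 1
--                     q.put((nr,nc,d+1))
--
--         if any(0 in row for row in grid):
--             return -1
--
--         return d
-- ===== SOURCE B (Python) =====
-- def zombieMatrix(grid):
--     """
--     :type grid: List[List[int]]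
--     :rtype: int
--     """
--     ROW = len(grid)
--     COLUMN = len(grid[0])
--     d = 0
--     # synchronous cellular-automaton simulation: one full-grid scan per round,
--     # grid mutated in place after each scan; no queue or frontier is carried
--     while True:
--         changes = [(r, c)
--                    for r in range(ROW)
--                    for c in range(COLUMN)
--                    if grid[r][c] == 0 and any(
--                        0 <= nr < ROW and 0 <= nc < len(grid[nr]) and grid[nr][nc] == 1
--                        for nr, nc in ((r - 1, c), (r, c - 1), (r + 1, c), (r, c + 1)))]
--         if not changes:
--             break
--         d += 1
--         for r, c in changes:
--             grid[r][c] = 1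
--     if any(0 in row for row in grid):
--         return -1
--     return d
-- ===== Notes on version B (the rewrite author's own statement) =====
-- stated objective: alternative
-- what changed: Replaces A's BFS with a FIFO queue of (r,c,distance) triples by a synchronous cellular-automaton simulation: each round makes one full-grid scan collecting every 0-cell adjacent to a 1-cell, applies all infections at once, and counts the rounds; no queue, frontier or per-node distance is carried between rounds.
-- outside the precondition, e.g. on zombieMatrix([[2, 2], [2]]): A returns 0, B raises IndexError
import Mathlib
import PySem

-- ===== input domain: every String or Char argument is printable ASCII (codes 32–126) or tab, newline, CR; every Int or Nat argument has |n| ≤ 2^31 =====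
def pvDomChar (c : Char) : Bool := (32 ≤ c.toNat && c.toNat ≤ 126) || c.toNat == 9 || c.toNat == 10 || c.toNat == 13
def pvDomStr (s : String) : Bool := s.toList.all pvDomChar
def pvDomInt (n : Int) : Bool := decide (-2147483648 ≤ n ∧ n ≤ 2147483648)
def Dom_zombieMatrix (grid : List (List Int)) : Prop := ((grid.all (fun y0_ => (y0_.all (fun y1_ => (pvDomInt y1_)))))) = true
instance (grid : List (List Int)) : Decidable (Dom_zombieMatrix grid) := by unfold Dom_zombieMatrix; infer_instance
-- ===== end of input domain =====

-- B replaces A's queue BFS (per-node distances) by a synchronous cellular-automaton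
-- simulation: full-grid scans, all infections of a round applied at once, rounds counted
-- (objective: alternative algorithm, not faster).
-- Both Pythons mutate `grid` in place identically; the theorems are about the return value.

-- pvZeros counts the 0-cells of the grid: it is the termination measure of both loops.
def pvZeros (g : List (List Int)) : Nat := (g.map (fun row => row.count 0)).sum

-- the four neighbor coordinates ((up), (left), (down), (right)) — a helper in both Pythons
def pvNbrs (p : Int × Int) : List (Int × Int) :=
  [(p.1 - 1, p.2), (p.1, p.2 - 1), (p.1 + 1, p.2), (p.1, p.2 + 1)]

-- ===== PORT A =====
-- inner `for nr, nc in getNeighbors(...)` body: infect an in-bounds 0-neighbor and queue it with distance dd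
def pvAInfect (ROW COL dd : Int) (st : List (List Int) × List (Int × Int × Int))
    (nb : Int × Int) : List (List Int) × List (Int × Int × Int) :=
  if 0 ≤ nb.1 ∧ nb.1 < ROW ∧ 0 ≤ nb.2 ∧ nb.2 < COL then
    match PySem.List.pyGet? st.1 nb.1 with
    | some row =>
      match PySem.List.pyGet? row nb.2 with
      | some v =>
        if v = 0 then
          (PySem.List.pySetD st.1 nb.1 (PySem.List.pySetD row nb.2 1), st.2 ++ [(nb.1, nb.2, dd)])
        else st
      | none => st   -- grid[nr][nc] raises IndexError in Python here (ragged row): outside Pre_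
    | none => st     -- unreachable when ROW = len(grid)
  else st

-- one queue pop: visit the four neighbors of (r, c)
def pvANbrs (ROW COL : Int) (g : List (List Int)) (r c dd : Int) :
    List (List Int) × List (Int × Int × Int) :=
  (pvNbrs (r, c)).foldl (pvAInfect ROW COL dd) (g, [])

-- pyGet? with a nonnegative index is plain in-range indexing
lemma pvGet_some_of_nonneg {a : Type} {xs : List a} {i : Int} {x : a}
    (h0 : 0 ≤ i) (h : PySem.List.pyGet? xs i = some x) : xs[i.toNat]? = some x := by
  simp only [PySem.List.pyGet?, PySem.List.pyIdx?, if_pos h0] at h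
  split at h
  · simpa using h
  · simp at h

-- overwriting a 0-cell of a row with 1 removes exactly one zero
lemma pvCount_set_one (row : List Int) : ∀ (m : Nat), row[m]? = some 0 →
    (row.set m 1).count 0 + 1 = row.count 0 := by
  induction row with
  | nil => intro m h; simp at h
  | cons x xs ih =>
    intro m h
    cases m with
    | zero => simp at h; subst h; simp
    | succ m =>
      simp at h
      have := ih m (by simpa using h)
      simp [List.count_cons]
      omega

-- overwriting any cell with 1 never adds a zero
lemma pvCount_set_le (row : List Int) : ∀ (m : Nat), (row.set m 1).count 0 ≤ row.count 0 := by
  induction row with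
  | nil => intro m; simp
  | cons x xs ih =>
    intro m
    cases m with
    | zero =>
      simp only [List.set_cons_zero, List.count_cons]
      split_ifs <;> simp_all
    | succ m =>
      have := ih m
      simp [List.count_cons]
      omega

-- replacing row n changes pvZeros by the difference of the two rows' zero counts
lemma pvZeros_set (g : List (List Int)) : ∀ (n : Nat) (row row' : List Int), g[n]? = some row →
    pvZeros (g.set n row') + row.count 0 = pvZeros g + row'.count 0 := by
  induction g with
  | nil => intro n row row' h; simp at h
  | cons x xs ih =>
    intro n row row' h
    cases n with
    | zero => simp at h; subst h; simp [pvZeros]; omega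
    | succ n =>
      simp at h
      have := ih n row row' (by simpa using h)
      simp [pvZeros] at this ⊢
      omega

lemma pvAInfect_zeros (ROW COL dd : Int) (st : List (List Int) × List (Int × Int × Int))
    (nb : Int × Int) :
    pvZeros (pvAInfect ROW COL dd st nb).1 + (pvAInfect ROW COL dd st nb).2.length
      = pvZeros st.1 + st.2.length := by
  unfold pvAInfect
  split
  · rename_i hb
    cases hrow : PySem.List.pyGet? st.1 nb.1 with
    | none => simp
    | some row =>
      dsimp only
      cases hv : PySem.List.pyGet? row nb.2 with
      | none => rfl
      | some v =>
        dsimp only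
        by_cases hv0 : v = 0
        · subst hv0
          have h1 := pvGet_some_of_nonneg hb.1 hrow
          have h2 := pvGet_some_of_nonneg hb.2.2.1 hv
          rw [PySem.List.pySetD_of_nonneg _ _ hb.1, PySem.List.pySetD_of_nonneg _ _ hb.2.2.1]
          have hz := pvZeros_set st.1 nb.1.toNat row (row.set nb.2.toNat 1) h1
          have hc := pvCount_set_one row nb.2.toNat h2
          simp only [if_true, List.length_append, List.length_cons, List.length_nil]
          omega
        · rw [if_neg hv0]
  · rfl

lemma pvAFold_zeros (ROW COL dd : Int) (L : List (Int × Int)) :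
    ∀ (st : List (List Int) × List (Int × Int × Int)),
    pvZeros (L.foldl (pvAInfect ROW COL dd) st).1 + (L.foldl (pvAInfect ROW COL dd) st).2.length
      = pvZeros st.1 + st.2.length := by
  induction L with
  | nil => intro st; rfl
  | cons x xs ih =>
    intro st
    rw [List.foldl_cons, ih (pvAInfect ROW COL dd st x), pvAInfect_zeros]

lemma pvANbrs_zeros (ROW COL : Int) (g : List (List Int)) (r c dd : Int) :
    pvZeros (pvANbrs ROW COL g r c dd).1 + (pvANbrs ROW COL g r c dd).2.length = pvZeros g := by
  unfold pvANbrs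
  rw [pvAFold_zeros]
  rfl

-- the `while q.empty() is False` loop; dl is the d of the most recent pop (0 before any pop)
def pvALoop (ROW COL : Int) (g : List (List Int)) (q : List (Int × Int × Int)) (dl : Int) : Int :=
  match q with
  | [] => if g.any (fun row => row.contains (0 : Int)) then -1 else dl
  | (r, c, d) :: rest =>
    pvALoop ROW COL (pvANbrs ROW COL g r c (d + 1)).1
      (rest ++ (pvANbrs ROW COL g r c (d + 1)).2) d
termination_by 5 * pvZeros g + q.length
decreasing_by
  have h := pvANbrs_zeros ROW COL g r c (d + 1)
  simp only [List.length_append, List.length_cons]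
  omega

-- queue population: nested for-loops over enumerate(grid) / enumerate(row)
def pvAInit (grid : List (List Int)) : List (Int × Int × Int) :=
  (PySem.List.enumerate grid 0).foldl
    (fun q rp =>
      (PySem.List.enumerate rp.2 0).foldl
        (fun q cp => if cp.2 = 1 then q ++ [(rp.1, cp.1, (0 : Int))] else q) q)
    []

def zombieMatrix (grid : List (List Int)) : Int :=
  pvALoop (grid.length : Int) ((grid.headD []).length : Int) grid (pvAInit grid) 0

-- ===== PORT B =====
-- `0 <= nr < ROW and 0 <= nc < len(grid[nr]) and grid[nr][nc] == 1` for one neighbor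
def pvOneAt (ROW : Int) (g : List (List Int)) (nb : Int × Int) : Bool :=
  if 0 ≤ nb.1 ∧ nb.1 < ROW then
    match PySem.List.pyGet? g nb.1 with
    | some row =>
      decide (0 ≤ nb.2 ∧ nb.2 < (row.length : Int)) && (PySem.List.pyGet? row nb.2 == some 1)
    | none => false   -- unreachable: ROW = len(grid)
  else false

-- `grid[r][c] == 0` (false where Python would raise IndexError: outside Pre_)
def pvCellIsZero (g : List (List Int)) (r c : Int) : Bool :=
  match PySem.List.pyGet? g r with
  | some row => PySem.List.pyGet? row c == some 0
  | none => false

-- the round's comprehension: every 0-cell with an infected neighbor, in row-major order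
def pvChanges (ROW COL : Int) (g : List (List Int)) : List (Int × Int) :=
  (PySem.List.pyRange 0 ROW 1).flatMap (fun r =>
    (PySem.List.pyRange 0 COL 1).filterMap (fun c =>
      if pvCellIsZero g r c && (pvNbrs (r, c)).any (pvOneAt ROW g) then some (r, c) else none))

-- `grid[r][c] = 1`
def pvSetOne (g : List (List Int)) (p : Int × Int) : List (List Int) :=
  match PySem.List.pyGet? g p.1 with
  | some row => PySem.List.pySetD g p.1 (PySem.List.pySetD row p.2 1)
  | none => g   -- unreachable: r is in range(ROW)

-- `for r, c in changes: grid[r][c] = 1`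
def pvApply (g : List (List Int)) (ch : List (Int × Int)) : List (List Int) :=
  ch.foldl pvSetOne g

-- membership in the round's change list (needed to justify the loop's termination)
lemma pvChanges_mem (ROW COL : Int) (g : List (List Int)) (q : Int × Int) :
    q ∈ pvChanges ROW COL g ↔
      0 ≤ q.1 ∧ q.1 < ROW ∧ 0 ≤ q.2 ∧ q.2 < COL ∧ pvCellIsZero g q.1 q.2 = true ∧
        (pvNbrs q).any (pvOneAt ROW g) = true := by
  unfold pvChanges
  simp only [List.mem_flatMap, List.mem_filterMap, PySem.List.mem_pyRange_one]
  constructor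
  · rintro ⟨r, hr, c, hc, hq⟩
    split at hq
    · rename_i hcond
      cases hq
      simp only [Bool.and_eq_true] at hcond
      exact ⟨hr.1, hr.2, hc.1, hc.2, hcond.1, hcond.2⟩
    · cases hq
  · rintro ⟨h1, h2, h3, h4, h5, h6⟩
    refine ⟨q.1, ⟨h1, h2⟩, q.2, ⟨h3, h4⟩, ?_⟩
    rw [if_pos (by simp [h5, h6])]

lemma pvSetOne_zeros_le (g : List (List Int)) (p : Int × Int)
    (h1 : 0 ≤ p.1) (h2 : 0 ≤ p.2) : pvZeros (pvSetOne g p) ≤ pvZeros g := by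
  unfold pvSetOne
  cases hrow : PySem.List.pyGet? g p.1 with
  | none => exact le_refl _
  | some row =>
    dsimp only
    rw [PySem.List.pySetD_of_nonneg _ _ h1, PySem.List.pySetD_of_nonneg _ _ h2]
    have hz := pvZeros_set g p.1.toNat row (row.set p.2.toNat 1) (pvGet_some_of_nonneg h1 hrow)
    have hc := pvCount_set_le row p.2.toNat
    omega

lemma pvSetOne_zeros_lt (g : List (List Int)) (p : Int × Int)
    (h1 : 0 ≤ p.1) (h2 : 0 ≤ p.2) (hz : pvCellIsZero g p.1 p.2 = true) :
    pvZeros (pvSetOne g p) < pvZeros g := by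
  unfold pvCellIsZero at hz
  unfold pvSetOne
  cases hrow : PySem.List.pyGet? g p.1 with
  | none => rw [hrow] at hz; cases hz
  | some row =>
    rw [hrow] at hz
    dsimp only at hz ⊢
    have hv : PySem.List.pyGet? row p.2 = some 0 := by
      cases hv' : PySem.List.pyGet? row p.2 with
      | none => rw [hv'] at hz; cases hz
      | some v =>
        rw [hv'] at hz
        have hv0 : v = 0 := by simpa using hz
        rw [hv0]
    rw [PySem.List.pySetD_of_nonneg _ _ h1, PySem.List.pySetD_of_nonneg _ _ h2]
    have hzz := pvZeros_set g p.1.toNat row (row.set p.2.toNat 1) (pvGet_some_of_nonneg h1 hrow)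
    have hc := pvCount_set_one row p.2.toNat (pvGet_some_of_nonneg h2 hv)
    omega

lemma pvApply_zeros_le (ch : List (Int × Int)) :
    ∀ (g : List (List Int)), (∀ p ∈ ch, 0 ≤ p.1 ∧ 0 ≤ p.2) →
    pvZeros (pvApply g ch) ≤ pvZeros g := by
  induction ch with
  | nil => intro g _; exact le_refl _
  | cons p rest ih =>
    intro g h
    have h1 := h p (by simp)
    calc pvZeros (pvApply (pvSetOne g p) rest) ≤ pvZeros (pvSetOne g p) :=
          ih _ (fun q hq => h q (by simp [hq]))
      _ ≤ pvZeros g := pvSetOne_zeros_le g p h1.1 h1.2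

lemma pvApply_zeros_lt (ROW COL : Int) (g : List (List Int))
    (h : pvChanges ROW COL g ≠ []) :
    pvZeros (pvApply g (pvChanges ROW COL g)) < pvZeros g := by
  cases hch : pvChanges ROW COL g with
  | nil => exact absurd hch h
  | cons p rest =>
    have hp : p ∈ pvChanges ROW COL g := by rw [hch]; simp
    rw [pvChanges_mem] at hp
    have hrest : ∀ q ∈ rest, 0 ≤ q.1 ∧ 0 ≤ q.2 := by
      intro q hq
      have : q ∈ pvChanges ROW COL g := by rw [hch]; simp [hq]
      rw [pvChanges_mem] at this
      exact ⟨this.1, this.2.2.1⟩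
    calc pvZeros (pvApply (pvSetOne g p) rest) ≤ pvZeros (pvSetOne g p) :=
          pvApply_zeros_le rest _ hrest
      _ < pvZeros g := pvSetOne_zeros_lt g p hp.1 hp.2.2.1 hp.2.2.2.2.1

-- the `while True` loop: one full scan per round, all changes applied at once
def pvSyncOuter (ROW COL : Int) (g : List (List Int)) (d : Int) : Int :=
  if h : pvChanges ROW COL g = [] then
    if g.any (fun row => row.contains (0 : Int)) then -1 else d
  else
    pvSyncOuter ROW COL (pvApply g (pvChanges ROW COL g)) (d + 1)
termination_by pvZeros g
decreasing_by
  exact pvApply_zeros_lt ROW COL g h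

def zombieMatrix_alt (grid : List (List Int)) : Int :=
  pvSyncOuter (grid.length : Int) ((grid.headD []).length : Int) grid 0

-- ===== PRECONDITION & SPEC =====
-- Pre_ excludes the empty grid (len(grid[0]) raises IndexError) and grids whose later rows
-- are shorter than row 0, where cell reads grid[r][c], r < ROW, c < COLUMN, can raise
-- IndexError (in B's full scan always, in A's BFS on reachable cells; on a few such ragged
-- grids A still returns while B raises — excluded with the rest for the same reason).
def Pre_zombieMatrix (grid : List (List Int)) : Prop :=
  grid ≠ [] ∧ ∀ row ∈ grid, (grid.headD []).length ≤ row.length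
instance (grid : List (List Int)) : Decidable (Pre_zombieMatrix grid) := by
  unfold Pre_zombieMatrix; infer_instance
def pvWitness_zombieMatrix : List (List Int) := [[1, 0], [0, 0]]

def Spec_zombieMatrix (grid : List (List Int)) (out : Int) : Prop := out = zombieMatrix_alt grid
instance (grid : List (List Int)) (out : Int) : Decidable (Spec_zombieMatrix grid out) := by
  unfold Spec_zombieMatrix; infer_instance

-- ===== CLAIM (what is proved, stated in full; the proofs are below) =====
def Claim_equal_zombieMatrix : Prop := ∀ (grid : List (List Int)), Dom_zombieMatrix grid → Pre_zombieMatrix grid → Spec_zombieMatrix grid (zombieMatrix grid)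


-- ===== LEMMAS AND PROOFS =====

-- ---- intermediate frontier-level BFS (proof-only): one wave = one queue level ----
def pvFInfect (ROW COL : Int) (st : List (List Int) × List (Int × Int))
    (nb : Int × Int) : List (List Int) × List (Int × Int) :=
  if 0 ≤ nb.1 ∧ nb.1 < ROW ∧ 0 ≤ nb.2 ∧ nb.2 < COL then
    match PySem.List.pyGet? st.1 nb.1 with
    | some row =>
      match PySem.List.pyGet? row nb.2 with
      | some v =>
        if v = 0 then
          (PySem.List.pySetD st.1 nb.1 (PySem.List.pySetD row nb.2 1), st.2 ++ [(nb.1, nb.2)])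
        else st
      | none => st
    | none => st
  else st

def pvFWave (ROW COL : Int) : List (List Int) → List (Int × Int) → List (Int × Int) →
    List (List Int) × List (Int × Int)
  | g, [], wave => (g, wave)
  | g, p :: cs, wave =>
    pvFWave ROW COL ((pvNbrs p).foldl (pvFInfect ROW COL) (g, wave)).1 cs
      ((pvNbrs p).foldl (pvFInfect ROW COL) (g, wave)).2

lemma pvFInfect_zeros (ROW COL : Int) (st : List (List Int) × List (Int × Int)) (nb : Int × Int) :
    pvZeros (pvFInfect ROW COL st nb).1 + (pvFInfect ROW COL st nb).2.length
      = pvZeros st.1 + st.2.length := by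
  unfold pvFInfect
  split
  · rename_i hb
    cases hrow : PySem.List.pyGet? st.1 nb.1 with
    | none => simp
    | some row =>
      dsimp only
      cases hv : PySem.List.pyGet? row nb.2 with
      | none => rfl
      | some v =>
        dsimp only
        by_cases hv0 : v = 0
        · subst hv0
          have h1 := pvGet_some_of_nonneg hb.1 hrow
          have h2 := pvGet_some_of_nonneg hb.2.2.1 hv
          rw [PySem.List.pySetD_of_nonneg _ _ hb.1, PySem.List.pySetD_of_nonneg _ _ hb.2.2.1]
          have hz := pvZeros_set st.1 nb.1.toNat row (row.set nb.2.toNat 1) h1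
          have hc := pvCount_set_one row nb.2.toNat h2
          simp only [if_true, List.length_append, List.length_cons, List.length_nil]
          omega
        · rw [if_neg hv0]
  · rfl

lemma pvFFold_zeros (ROW COL : Int) (L : List (Int × Int)) :
    ∀ (st : List (List Int) × List (Int × Int)),
    pvZeros (L.foldl (pvFInfect ROW COL) st).1 + (L.foldl (pvFInfect ROW COL) st).2.length
      = pvZeros st.1 + st.2.length := by
  induction L with
  | nil => intro st; rfl
  | cons x xs ih =>
    intro st
    rw [List.foldl_cons, ih (pvFInfect ROW COL st x), pvFInfect_zeros]

lemma pvFWave_zeros (ROW COL : Int) (cs : List (Int × Int)) (g : List (List Int))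
    (wave : List (Int × Int)) :
    pvZeros (pvFWave ROW COL g cs wave).1 + (pvFWave ROW COL g cs wave).2.length
      = pvZeros g + wave.length := by
  induction cs generalizing g wave with
  | nil => rfl
  | cons p cs ih =>
    rw [pvFWave, ih]
    have := pvFFold_zeros ROW COL (pvNbrs p) (g, wave)
    omega

def pvFOuter (ROW COL : Int) (g : List (List Int)) (frontier : List (Int × Int)) (d : Int) : Int :=
  match frontier with
  | [] => if g.any (fun row => row.contains (0 : Int)) then -1 else d
  | p :: cs =>
    if h : (pvFWave ROW COL g (p :: cs) []).2.isEmpty then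
      if (pvFWave ROW COL g (p :: cs) []).1.any (fun row => row.contains (0 : Int)) then -1 else d
    else
      pvFOuter ROW COL (pvFWave ROW COL g (p :: cs) []).1 (pvFWave ROW COL g (p :: cs) []).2 (d + 1)
termination_by pvZeros g
decreasing_by
  have hz := pvFWave_zeros ROW COL (p :: cs) g []
  cases hw : (pvFWave ROW COL g (p :: cs) []).2 with
  | nil => rw [hw] at h; simp at h
  | cons q qs => rw [hw] at hz; simp at hz ⊢; omega

def pvFInit (grid : List (List Int)) : List (Int × Int) :=
  (PySem.List.enumerate grid 0).flatMap
    (fun rp => (PySem.List.enumerate rp.2 0).filterMap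
      (fun cp => if cp.2 = 1 then some (rp.1, cp.1) else none))

-- ---- queue BFS = frontier BFS (A-side bridge) ----
lemma pvAInfect_eq_pvFInfect (ROW COL dd : Int) (g : List (List Int))
    (acc : List (Int × Int)) (nb : Int × Int) :
    pvAInfect ROW COL dd (g, acc.map (fun p => (p.1, p.2, dd))) nb
      = ((pvFInfect ROW COL (g, acc) nb).1,
         (pvFInfect ROW COL (g, acc) nb).2.map (fun p => (p.1, p.2, dd))) := by
  unfold pvAInfect pvFInfect
  split
  · cases hrow : PySem.List.pyGet? g nb.1 with
    | none => rfl
    | some row =>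
      dsimp only
      cases hv : PySem.List.pyGet? row nb.2 with
      | none => rfl
      | some v =>
        dsimp only
        by_cases hv0 : v = 0
        · subst hv0; simp
        · rw [if_neg hv0, if_neg hv0]
  · rfl

lemma pvANbrs_eq_pvFNbrs (ROW COL : Int) (g : List (List Int)) (r c dd : Int) :
    pvANbrs ROW COL g r c dd
      = (((pvNbrs (r, c)).foldl (pvFInfect ROW COL) (g, [])).1,
         ((pvNbrs (r, c)).foldl (pvFInfect ROW COL) (g, [])).2.map
           (fun p => (p.1, p.2, dd))) := by
  have main : ∀ (L : List (Int × Int)) (g : List (List Int)) (acc : List (Int × Int)),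
      L.foldl (pvAInfect ROW COL dd) (g, acc.map (fun p => (p.1, p.2, dd)))
        = ((L.foldl (pvFInfect ROW COL) (g, acc)).1,
           (L.foldl (pvFInfect ROW COL) (g, acc)).2.map (fun p => (p.1, p.2, dd))) := by
    intro L
    induction L with
    | nil => intro g acc; rfl
    | cons x xs ih =>
      intro g acc
      rw [List.foldl_cons, List.foldl_cons, pvAInfect_eq_pvFInfect]
      exact ih (pvFInfect ROW COL (g, acc) x).1 (pvFInfect ROW COL (g, acc) x).2
  have := main (pvNbrs (r, c)) g []
  simpa [pvANbrs] using this

lemma pvFInfect_acc (ROW COL : Int) (g : List (List Int)) (acc : List (Int × Int))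
    (nb : Int × Int) :
    pvFInfect ROW COL (g, acc) nb
      = ((pvFInfect ROW COL (g, []) nb).1, acc ++ (pvFInfect ROW COL (g, []) nb).2) := by
  unfold pvFInfect
  split
  · cases hrow : PySem.List.pyGet? g nb.1 with
    | none => simp
    | some row =>
      dsimp only
      cases hv : PySem.List.pyGet? row nb.2 with
      | none => simp
      | some v =>
        dsimp only
        by_cases hv0 : v = 0
        · subst hv0; simp
        · rw [if_neg hv0, if_neg hv0]; simp
  · simp

lemma pvFFold_acc (ROW COL : Int) (L : List (Int × Int)) :
    ∀ (g : List (List Int)) (acc : List (Int × Int)),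
    L.foldl (pvFInfect ROW COL) (g, acc)
      = ((L.foldl (pvFInfect ROW COL) (g, [])).1, acc ++ (L.foldl (pvFInfect ROW COL) (g, [])).2) := by
  induction L with
  | nil => intro g acc; simp
  | cons x xs ih =>
    intro g acc
    rw [List.foldl_cons, List.foldl_cons, pvFInfect_acc,
      ih (pvFInfect ROW COL (g, []) x).1 (acc ++ (pvFInfect ROW COL (g, []) x).2),
      ih (pvFInfect ROW COL (g, []) x).1 (pvFInfect ROW COL (g, []) x).2]
    simp

lemma pvFWave_cons (ROW COL : Int) (g : List (List Int)) (p : Int × Int)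
    (cs nxt : List (Int × Int)) :
    pvFWave ROW COL g (p :: cs) nxt
      = pvFWave ROW COL (((pvNbrs p).foldl (pvFInfect ROW COL) (g, [])).1) cs
          (nxt ++ ((pvNbrs p).foldl (pvFInfect ROW COL) (g, [])).2) := by
  rw [pvFWave, pvFFold_acc]

lemma pvInitRow_eq (r : Int) (L : List (Int × Int)) :
    ∀ (q : List (Int × Int × Int)),
    L.foldl (fun q cp => if cp.2 = 1 then q ++ [(r, cp.1, (0 : Int))] else q) q
      = q ++ (L.filterMap (fun cp => if cp.2 = 1 then some (r, cp.1) else none)).map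
          (fun p => (p.1, p.2, (0 : Int))) := by
  induction L with
  | nil => intro q; simp
  | cons x xs ih =>
    intro q
    rw [List.foldl_cons]
    by_cases h : x.2 = 1
    · simp [h, ih]
    · simp [h, ih]

lemma pvInitFold_eq (L : List (Int × List Int)) :
    L.foldl
      (fun q rp =>
        (PySem.List.enumerate rp.2 0).foldl
          (fun q cp => if cp.2 = 1 then q ++ [(rp.1, cp.1, (0 : Int))] else q) q)
      []
      = (L.flatMap (fun rp => (PySem.List.enumerate rp.2 0).filterMap
          (fun cp => if cp.2 = 1 then some (rp.1, cp.1) else none))).map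
          (fun p => (p.1, p.2, (0 : Int))) := by
  have main : ∀ (M : List (Int × List Int)) (q : List (Int × Int × Int)),
      M.foldl
        (fun q rp =>
          (PySem.List.enumerate rp.2 0).foldl
            (fun q cp => if cp.2 = 1 then q ++ [(rp.1, cp.1, (0 : Int))] else q) q)
        q
        = q ++ (M.flatMap (fun rp => (PySem.List.enumerate rp.2 0).filterMap
            (fun cp => if cp.2 = 1 then some (rp.1, cp.1) else none))).map
            (fun p => (p.1, p.2, (0 : Int))) := by
    intro M
    induction M with
    | nil => intro q; simp
    | cons x xs ih =>
      intro q
      rw [List.foldl_cons, pvInitRow_eq, ih]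
      simp
  simpa using main L []

lemma pop_wave (ROW COL bd : Int) (front : List (Int × Int)) :
    ∀ (g : List (List Int)) (nxt : List (Int × Int)) (dl : Int),
    pvALoop ROW COL g (front.map (fun p => (p.1, p.2, bd))
        ++ nxt.map (fun p => (p.1, p.2, bd + 1))) dl
      = pvALoop ROW COL (pvFWave ROW COL g front nxt).1
          ((pvFWave ROW COL g front nxt).2.map (fun p => (p.1, p.2, bd + 1)))
          (if front.isEmpty then dl else bd) := by
  induction front generalizing bd with
  | nil => intro g nxt dl; simp [pvFWave]
  | cons p cs ih =>
    intro g nxt dl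
    rw [List.map_cons, List.cons_append, pvALoop.eq_def]
    dsimp only
    rw [pvANbrs_eq_pvFNbrs, pvFWave_cons]
    have hq : (List.map (fun p => (p.1, p.2, bd)) cs ++ List.map (fun p => (p.1, p.2, bd + 1)) nxt)
        ++ (((pvNbrs p).foldl (pvFInfect ROW COL) (g, [])).2).map (fun p => (p.1, p.2, bd + 1))
        = List.map (fun p => (p.1, p.2, bd)) cs
          ++ List.map (fun p => (p.1, p.2, bd + 1))
            (nxt ++ ((pvNbrs p).foldl (pvFInfect ROW COL) (g, [])).2) := by
      rw [List.map_append, List.append_assoc]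
    rw [hq, ih]
    simp

lemma outer_loop (ROW COL : Int) : ∀ (n : Nat) (g : List (List Int)) (fr : List (Int × Int))
    (d dl : Int), pvZeros g ≤ n → (fr = [] → dl = d) →
    pvALoop ROW COL g (fr.map (fun p => (p.1, p.2, d))) dl = pvFOuter ROW COL g fr d := by
  intro n
  induction n with
  | zero =>
    intro g fr d dl hz hdl
    cases fr with
    | nil => rw [hdl rfl, pvALoop.eq_def, pvFOuter.eq_def]; rfl
    | cons p cs =>
      have hw := pop_wave ROW COL d (p :: cs) g [] dl
      simp only [List.map_nil, List.append_nil] at hw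
      rw [hw, pvFOuter.eq_def]
      dsimp only
      have hzz := pvFWave_zeros ROW COL (p :: cs) g []
      cases hnx : (pvFWave ROW COL g (p :: cs) []).2 with
      | nil => rw [pvALoop.eq_def]; simp
      | cons q qs =>
        rw [hnx] at hzz
        simp at hzz
        omega
  | succ n ih =>
    intro g fr d dl hz hdl
    cases fr with
    | nil => rw [hdl rfl, pvALoop.eq_def, pvFOuter.eq_def]; rfl
    | cons p cs =>
      have hw := pop_wave ROW COL d (p :: cs) g [] dl
      simp only [List.map_nil, List.append_nil] at hw
      rw [hw, pvFOuter.eq_def]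
      dsimp only
      have hzz := pvFWave_zeros ROW COL (p :: cs) g []
      cases hnx : (pvFWave ROW COL g (p :: cs) []).2 with
      | nil => rw [pvALoop.eq_def]; simp
      | cons q qs =>
        rw [hnx] at hzz
        simp only [List.length_cons, List.length_nil, Nat.add_zero] at hzz
        simp only [List.isEmpty_cons, Bool.false_eq_true, if_false, dite_false]
        exact ih (pvFWave ROW COL g (p :: cs) []).1 (q :: qs) (d + 1) d
          (by omega) (by intro h; cases h)

lemma init_bridge (grid : List (List Int)) :
    pvAInit grid = (pvFInit grid).map (fun p => (p.1, p.2, (0 : Int))) := by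
  unfold pvAInit pvFInit
  rw [pvInitFold_eq]

-- ---- pointwise grid machinery: marking a predicate's cells with 1 ----
def pvRead? (g : List (List Int)) (r c : Int) : Option Int :=
  match PySem.List.pyGet? g r with
  | some row => PySem.List.pyGet? row c
  | none => none

def pvMark (P : Int → Int → Bool) (g : List (List Int)) : List (List Int) :=
  g.mapIdx (fun r row => row.mapIdx (fun c v => if P (r : Int) (c : Int) then 1 else v))

lemma pvMark_row (P : Int → Int → Bool) (g : List (List Int)) {r : Int} (hr : 0 ≤ r) :
    PySem.List.pyGet? (pvMark P g) r
      = (PySem.List.pyGet? g r).map (fun row => row.mapIdx (fun j v => if P r (j : Int) then 1 else v)) := by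
  rw [PySem.List.pyGet?_of_nonneg _ hr, PySem.List.pyGet?_of_nonneg _ hr]
  simp [pvMark, List.getElem?_mapIdx, Int.toNat_of_nonneg hr]

lemma pvRead?_pvMark (P : Int → Int → Bool) (g : List (List Int)) {r c : Int}
    (hr : 0 ≤ r) (hc : 0 ≤ c) :
    pvRead? (pvMark P g) r c = (pvRead? g r c).map (fun v => if P r c then 1 else v) := by
  unfold pvRead?
  rw [pvMark_row P g hr]
  cases hrow : PySem.List.pyGet? g r with
  | none => simp
  | some row =>
    simp only [Option.map_some]
    rw [PySem.List.pyGet?_of_nonneg _ hc, PySem.List.pyGet?_of_nonneg _ hc, List.getElem?_mapIdx]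
    cases row[c.toNat]? with
    | none => simp
    | some v => simp [Int.toNat_of_nonneg hc]

lemma pvCellIsZero_eq (g : List (List Int)) (r c : Int) :
    pvCellIsZero g r c = (pvRead? g r c == some 0) := by
  unfold pvCellIsZero pvRead?
  cases PySem.List.pyGet? g r <;> rfl

lemma pvGet_lt {xs : List Int} {i : Int} {x : Int}
    (h0 : 0 ≤ i) (h : PySem.List.pyGet? xs i = some x) : i < (xs.length : Int) := by
  have := pvGet_some_of_nonneg h0 h
  have h2 : i.toNat < xs.length := by
    by_contra hcon
    rw [List.getElem?_eq_none (by omega)] at this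
    cases this
  omega

lemma pvOneAt_iff (ROW : Int) (g : List (List Int)) (n : Int × Int) :
    pvOneAt ROW g n = true ↔
      0 ≤ n.1 ∧ n.1 < ROW ∧ 0 ≤ n.2 ∧ pvRead? g n.1 n.2 = some 1 := by
  unfold pvOneAt pvRead?
  split
  · rename_i hb
    cases hrow : PySem.List.pyGet? g n.1 with
    | none => simp
    | some row =>
      simp only [Bool.and_eq_true, decide_eq_true_eq, beq_iff_eq]
      constructor
      · rintro ⟨⟨h2, _⟩, h4⟩; exact ⟨hb.1, hb.2, h2, h4⟩
      · rintro ⟨_, _, h3, h4⟩; exact ⟨⟨h3, pvGet_lt h3 h4⟩, h4⟩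
  · rename_i hb
    simp only [Bool.false_eq_true, false_iff]
    rintro ⟨h1, h2, _, _⟩
    exact hb ⟨h1, h2⟩

lemma pvCellIsZero_pvMark (P : Int → Int → Bool) (g : List (List Int)) {r c : Int}
    (hr : 0 ≤ r) (hc : 0 ≤ c) :
    pvCellIsZero (pvMark P g) r c = (pvCellIsZero g r c && !(P r c)) := by
  rw [pvCellIsZero_eq, pvCellIsZero_eq, pvRead?_pvMark P g hr hc]
  cases pvRead? g r c with
  | none => simp
  | some v =>
    simp only [Option.map_some]
    cases hP : P r c <;> simp

lemma pvMark_pvMark (P Q : Int → Int → Bool) (g : List (List Int)) :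
    pvMark P (pvMark Q g) = pvMark (fun r c => Q r c || P r c) g := by
  apply List.ext_getElem (by simp [pvMark])
  intro i h1 h2
  simp only [pvMark, List.getElem_mapIdx]
  apply List.ext_getElem (by simp)
  intro j hj1 hj2
  simp only [List.getElem_mapIdx]
  by_cases hq : Q ↑i ↑j = true <;> by_cases hp : P ↑i ↑j = true <;> simp [hq, hp]

lemma pvMark_congr' (P Q : Int → Int → Bool) (g : List (List Int))
    (h : ∀ (r c : Nat) (row : List Int), g[r]? = some row → c < row.length →
      P (r : Int) (c : Int) = Q (r : Int) (c : Int)) :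
    pvMark P g = pvMark Q g := by
  apply List.ext_getElem (by simp [pvMark])
  intro i h1 h2
  simp only [pvMark, List.getElem_mapIdx]
  apply List.ext_getElem (by simp)
  intro j hj1 hj2
  simp only [List.getElem_mapIdx]
  have hi : i < g.length := by simpa [pvMark] using h1
  rw [h i j (g[i]'hi) (List.getElem?_eq_getElem hi) (by simpa using hj1)]

lemma pvMark_false (g : List (List Int)) : pvMark (fun _ _ => false) g = g := by
  apply List.ext_getElem (by simp [pvMark])
  intro i h1 h2
  simp only [pvMark, List.getElem_mapIdx]
  apply List.ext_getElem (by simp)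
  intro j hj1 hj2
  simp

lemma pvMark_of_false (P : Int → Int → Bool) (g : List (List Int))
    (h : ∀ r c, P r c = false) : pvMark P g = g := by
  have : P = fun _ _ => false := by funext r c; exact h r c
  rw [this, pvMark_false]

-- ---- the infection predicates ----
def pvInb (ROW COL r c : Int) : Bool := decide (0 ≤ r ∧ r < ROW ∧ 0 ≤ c ∧ c < COL)

def pvIP (ROW COL : Int) (g : List (List Int)) (ns : List (Int × Int)) (r c : Int) : Bool :=
  decide ((r, c) ∈ ns) && pvInb ROW COL r c && pvCellIsZero g r c

def pvWP (ROW COL : Int) (g : List (List Int)) (fr : List (Int × Int)) (r c : Int) : Bool :=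
  fr.any (fun p => decide ((r, c) ∈ pvNbrs p)) && pvInb ROW COL r c && pvCellIsZero g r c

def pvQP (ROW COL : Int) (g : List (List Int)) (r c : Int) : Bool :=
  pvInb ROW COL r c && pvCellIsZero g r c && (pvNbrs (r, c)).any (pvOneAt ROW g)

lemma pvNbrs_symm (p q : Int × Int) : q ∈ pvNbrs p ↔ p ∈ pvNbrs q := by
  simp [pvNbrs, Prod.ext_iff]
  omega

lemma pvInb_iff (ROW COL r c : Int) :
    pvInb ROW COL r c = true ↔ 0 ≤ r ∧ r < ROW ∧ 0 ≤ c ∧ c < COL := by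
  simp [pvInb]

lemma pvSet_point_mark (g : List (List Int)) (row : List Int) (a b : Int)
    (h1 : 0 ≤ a) (h2 : 0 ≤ b) (hrow : PySem.List.pyGet? g a = some row) :
    PySem.List.pySetD g a (PySem.List.pySetD row b 1)
      = pvMark (fun r c => decide (r = a ∧ c = b)) g := by
  have hga : g[a.toNat]? = some row := pvGet_some_of_nonneg h1 hrow
  have hia : a.toNat < g.length := by
    by_contra hcon
    rw [List.getElem?_eq_none (by omega)] at hga; cases hga
  have hrow' : g[a.toNat]'hia = row := by
    have h := List.getElem?_eq_getElem hia
    rw [hga] at h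
    exact (Option.some.injEq _ _).mp h.symm
  rw [PySem.List.pySetD_of_nonneg _ _ h2, PySem.List.pySetD_of_nonneg _ _ h1]
  apply List.ext_getElem (by simp [pvMark])
  intro i hi1 hi2
  simp only [pvMark, List.getElem_mapIdx, List.getElem_set]
  by_cases hie : a.toNat = i
  · subst hie
    rw [if_pos rfl, hrow']
    apply List.ext_getElem (by simp)
    intro j hj1 hj2
    simp only [List.getElem_mapIdx, List.getElem_set, decide_eq_true_eq]
    split_ifs <;> omega
  · rw [if_neg hie]
    apply List.ext_getElem (by simp)
    intro j hj1 hj2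
    simp only [List.getElem_mapIdx, decide_eq_true_eq]
    rw [if_neg]
    rintro ⟨hA, -⟩
    omega

lemma pvIP_single (ROW COL : Int) (g : List (List Int)) (n : Int × Int) (r c : Int) :
    pvIP ROW COL g [n] r c = true ↔ (r, c) = n ∧ pvIP ROW COL g [n] n.1 n.2 = true := by
  unfold pvIP
  by_cases hm : (r, c) = n
  · rw [← hm]
    simp
  · have : ((r, c) ∈ [n]) = False := by simp [hm]
    simp [this, hm]

lemma pvFInfect_mark (ROW COL : Int) (g : List (List Int)) (acc : List (Int × Int))
    (n : Int × Int) :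
    pvFInfect ROW COL (g, acc) n
      = (pvMark (pvIP ROW COL g [n]) g,
         acc ++ if pvIP ROW COL g [n] n.1 n.2 then [n] else []) := by
  unfold pvFInfect
  split
  · rename_i hb
    cases hrow : PySem.List.pyGet? g n.1 with
    | none =>
      have hz : pvCellIsZero g n.1 n.2 = false := by unfold pvCellIsZero; rw [hrow]
      have hfalse : ∀ r c, pvIP ROW COL g [n] r c = false := by
        intro r c
        by_cases hm : (r, c) = n
        · unfold pvIP
          rw [← hm] at hz
          simp [hz]
        · have : ((r, c) ∈ [n]) = False := by simp [hm]
          simp [pvIP, this]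
      rw [pvMark_of_false _ _ hfalse, hfalse n.1 n.2]
      simp
    | some row =>
      dsimp only
      cases hv : PySem.List.pyGet? row n.2 with
      | none =>
        have hz : pvCellIsZero g n.1 n.2 = false := by unfold pvCellIsZero; rw [hrow]; dsimp only; rw [hv]; rfl
        have hfalse : ∀ r c, pvIP ROW COL g [n] r c = false := by
          intro r c
          by_cases hm : (r, c) = n
          · unfold pvIP
            rw [← hm] at hz
            simp [hz]
          · have : ((r, c) ∈ [n]) = False := by simp [hm]
            simp [pvIP, this]
        rw [pvMark_of_false _ _ hfalse, hfalse n.1 n.2]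
        simp
      | some v =>
        dsimp only
        by_cases hv0 : v = 0
        · subst hv0
          have hz : pvCellIsZero g n.1 n.2 = true := by unfold pvCellIsZero; rw [hrow]; dsimp only; rw [hv]; rfl
          have hsingle : pvIP ROW COL g [n] n.1 n.2 = true := by
            unfold pvIP
            rw [hz, (pvInb_iff ROW COL n.1 n.2).mpr hb]
            simp
          have hpred : pvIP ROW COL g [n] = (fun r c => decide (r = n.1 ∧ c = n.2)) := by
            funext r c
            by_cases hm : r = n.1 ∧ c = n.2
            · rcases hm with ⟨hm1, hm2⟩; subst hm1; subst hm2
              rw [hsingle]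
              simp
            · have hm' : ¬ ((r, c) = n) := by
                rw [Prod.ext_iff]; exact hm
              have : ((r, c) ∈ [n]) = False := by simp [hm']
              simp [pvIP, this, hm]
          rw [if_pos rfl, hsingle, hpred,
            ← pvSet_point_mark g row n.1 n.2 hb.1 hb.2.2.1 hrow]
          simp
        · have hz : pvCellIsZero g n.1 n.2 = false := by
            unfold pvCellIsZero; rw [hrow]; dsimp only; rw [hv]; simpa using hv0
          have hfalse : ∀ r c, pvIP ROW COL g [n] r c = false := by
            intro r c
            by_cases hm : (r, c) = n
            · unfold pvIP
              rw [← hm] at hz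
              simp [hz]
            · have : ((r, c) ∈ [n]) = False := by simp [hm]
              simp [pvIP, this]
          rw [if_neg hv0, pvMark_of_false _ _ hfalse, hfalse n.1 n.2]
          simp
  · rename_i hb
    have hfalse : ∀ r c, pvIP ROW COL g [n] r c = false := by
      intro r c
      by_cases hm : (r, c) = n
      · unfold pvIP pvInb
        rw [← hm] at hb
        simp only [Bool.and_eq_false_iff]
        left; right; simpa using hb
      · have : ((r, c) ∈ [n]) = False := by simp [hm]
        simp [pvIP, this]
    rw [pvMark_of_false _ _ hfalse, hfalse n.1 n.2]
    simp

lemma pvIP_step (ROW COL : Int) (g : List (List Int)) (n : Int × Int) (ns : List (Int × Int))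
    (r c : Int) :
    (pvIP ROW COL g [n] r c || pvIP ROW COL (pvMark (pvIP ROW COL g [n]) g) ns r c)
      = pvIP ROW COL g (n :: ns) r c := by
  by_cases hin : pvInb ROW COL r c = true
  · obtain ⟨hr, hrR, hc, hcC⟩ := (pvInb_iff ROW COL r c).mp hin
    by_cases hz : pvCellIsZero g r c = true
    · have hzm := pvCellIsZero_pvMark (pvIP ROW COL g [n]) g hr hc
      by_cases hm : (r, c) = n
      · subst hm
        have h1 : pvIP ROW COL g [(r, c)] r c = true := by
          simp [pvIP, hin, hz]
        have h2 : pvIP ROW COL g ((r, c) :: ns) r c = true := by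
          simp [pvIP, hin, hz]
        rw [h1, h2]; rfl
      · have h1 : pvIP ROW COL g [n] r c = false := by
          have : ((r, c) ∈ [n]) = False := by simp [hm]
          simp [pvIP, this]
        have hzm' : pvCellIsZero (pvMark (pvIP ROW COL g [n]) g) r c = true := by
          rw [hzm, hz, h1]; rfl
        rw [h1]
        simp only [Bool.false_or]
        simp [pvIP, hin, hz, hzm', hm]
    · have hz' : pvCellIsZero g r c = false := by simpa using hz
      have hzm' : pvCellIsZero (pvMark (pvIP ROW COL g [n]) g) r c = false := by
        rw [pvCellIsZero_pvMark (pvIP ROW COL g [n]) g hr hc, hz']; rfl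
      simp [pvIP, hz', hzm']
  · have hin' : pvInb ROW COL r c = false := by simpa using hin
    simp [pvIP, hin']

lemma pvFFold_mark (ROW COL : Int) (ns : List (Int × Int)) :
    ∀ (g : List (List Int)) (acc : List (Int × Int)),
    (ns.foldl (pvFInfect ROW COL) (g, acc)).1 = pvMark (pvIP ROW COL g ns) g ∧
    (∀ q : Int × Int, q ∈ (ns.foldl (pvFInfect ROW COL) (g, acc)).2
        ↔ q ∈ acc ∨ pvIP ROW COL g ns q.1 q.2 = true) := by
  induction ns with
  | nil =>
    intro g acc
    constructor
    · rw [pvMark_of_false _ _ (fun r c => by simp [pvIP])]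
      rfl
    · intro q
      simp [pvIP]
  | cons n ns ih =>
    intro g acc
    rw [List.foldl_cons, pvFInfect_mark]
    obtain ⟨ih1, ih2⟩ := ih (pvMark (pvIP ROW COL g [n]) g)
      (acc ++ if pvIP ROW COL g [n] n.1 n.2 then [n] else [])
    constructor
    · rw [ih1, pvMark_pvMark]
      congr 1
      funext r c
      exact pvIP_step ROW COL g n ns r c
    · intro q
      rw [ih2 q, List.mem_append]
      have hstep := pvIP_step ROW COL g n ns q.1 q.2
      have hone : q ∈ (if pvIP ROW COL g [n] n.1 n.2 then [n] else ([] : List (Int × Int)))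
          ↔ pvIP ROW COL g [n] q.1 q.2 = true := by
        split
        · rename_i hb
          simp only [List.mem_singleton]
          rw [pvIP_single]
          constructor
          · intro h; exact ⟨by rw [h], hb⟩
          · rintro ⟨h, -⟩
            obtain ⟨h1, h2⟩ := Prod.ext_iff.mp h
            exact Prod.ext_iff.mpr ⟨h1, h2⟩
        · rename_i hb
          simp only [List.not_mem_nil, false_iff]
          intro h
          rw [pvIP_single] at h
          exact hb h.2
      rw [hone]
      rw [← hstep]
      simp only [Bool.or_eq_true]
      tauto

lemma pvWP_step (ROW COL : Int) (g : List (List Int)) (p : Int × Int) (cs : List (Int × Int))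
    (r c : Int) :
    (pvIP ROW COL g (pvNbrs p) r c
        || pvWP ROW COL (pvMark (pvIP ROW COL g (pvNbrs p)) g) cs r c)
      = pvWP ROW COL g (p :: cs) r c := by
  by_cases hin : pvInb ROW COL r c = true
  · obtain ⟨hr, hrR, hc, hcC⟩ := (pvInb_iff ROW COL r c).mp hin
    by_cases hz : pvCellIsZero g r c = true
    · have hzm := pvCellIsZero_pvMark (pvIP ROW COL g (pvNbrs p)) g hr hc
      by_cases hm : (r, c) ∈ pvNbrs p
      · have h1 : pvIP ROW COL g (pvNbrs p) r c = true := by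
          simp [pvIP, hin, hz, hm]
        have h2 : pvWP ROW COL g (p :: cs) r c = true := by
          simp only [pvWP, List.any_cons]
          simp [hin, hz, hm]
        rw [h1, h2]; rfl
      · have h1 : pvIP ROW COL g (pvNbrs p) r c = false := by
          simp [pvIP, hm]
        have hzm' : pvCellIsZero (pvMark (pvIP ROW COL g (pvNbrs p)) g) r c = true := by
          rw [hzm, hz, h1]; rfl
        rw [h1]
        simp only [Bool.false_or]
        simp [pvWP, hin, hz, hzm', hm]
    · have hz' : pvCellIsZero g r c = false := by simpa using hz
      have hzm' : pvCellIsZero (pvMark (pvIP ROW COL g (pvNbrs p)) g) r c = false := by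
        rw [pvCellIsZero_pvMark (pvIP ROW COL g (pvNbrs p)) g hr hc, hz']; rfl
      simp [pvIP, pvWP, hz', hzm']
  · have hin' : pvInb ROW COL r c = false := by simpa using hin
    simp [pvIP, pvWP, hin']

lemma pvFWave_mark (ROW COL : Int) (fr : List (Int × Int)) :
    ∀ (g : List (List Int)) (nxt : List (Int × Int)),
    (pvFWave ROW COL g fr nxt).1 = pvMark (pvWP ROW COL g fr) g ∧
    (∀ q : Int × Int, q ∈ (pvFWave ROW COL g fr nxt).2
        ↔ q ∈ nxt ∨ pvWP ROW COL g fr q.1 q.2 = true) := by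
  induction fr with
  | nil =>
    intro g nxt
    constructor
    · rw [pvFWave, pvMark_of_false]
      intro r c
      simp [pvWP]
    · intro q
      rw [pvFWave]
      simp [pvWP]
  | cons p cs ih =>
    intro g nxt
    rw [pvFWave]
    obtain ⟨hf1, hf2⟩ := pvFFold_mark ROW COL (pvNbrs p) g nxt
    obtain ⟨ih1, ih2⟩ := ih ((pvNbrs p).foldl (pvFInfect ROW COL) (g, nxt)).1
      ((pvNbrs p).foldl (pvFInfect ROW COL) (g, nxt)).2
    constructor
    · rw [ih1, hf1, pvMark_pvMark]
      congr 1
      funext r c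
      exact pvWP_step ROW COL g p cs r c
    · intro q
      rw [ih2 q, hf1, hf2 q]
      have hstep := pvWP_step ROW COL g p cs q.1 q.2
      rw [← hstep]
      simp only [Bool.or_eq_true]
      tauto

-- ---- sync side: applying a round's changes is marking them ----
lemma pvSetOne_mark (g : List (List Int)) (p : Int × Int) (h1 : 0 ≤ p.1) (h2 : 0 ≤ p.2) :
    pvSetOne g p
      = pvMark (fun r c => decide ((r, c) = p) && (pvRead? g r c).isSome) g := by
  unfold pvSetOne
  cases hrow : PySem.List.pyGet? g p.1 with
  | none =>
    rw [pvMark_of_false]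
    intro r c
    by_cases hm : (r, c) = p
    · have hm1 : r = p.1 := (Prod.ext_iff.mp hm).1
      have : pvRead? g r c = none := by
        unfold pvRead?; rw [hm1, hrow]
      simp [this]
    · simp [hm]
  | some row =>
    dsimp only
    cases hv : PySem.List.pyGet? row p.2 with
    | none =>
      have hlen : row.length ≤ p.2.toNat := by
        rw [PySem.List.pyGet?_of_nonneg _ h2] at hv
        exact List.getElem?_eq_none_iff.mp hv
      have hga : g[p.1.toNat]? = some row := pvGet_some_of_nonneg h1 hrow
      have hia : p.1.toNat < g.length := by
        by_contra hcon
        rw [List.getElem?_eq_none (by omega)] at hga; cases hga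
      have hrow' : g[p.1.toNat]'hia = row := by
        have h := List.getElem?_eq_getElem hia
        rw [hga] at h
        exact (Option.some.injEq _ _).mp h.symm
      have hsetrow : PySem.List.pySetD row p.2 1 = row := by
        rw [PySem.List.pySetD_of_nonneg _ _ h2]
        exact List.set_eq_of_length_le hlen
      have hsetg : PySem.List.pySetD g p.1 row = g := by
        rw [PySem.List.pySetD_of_nonneg _ _ h1, ← hrow']
        exact List.set_getElem_self hia
      rw [hsetrow, hsetg, pvMark_of_false]
      intro r c
      by_cases hm : (r, c) = p
      · have hm1 : r = p.1 := (Prod.ext_iff.mp hm).1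
        have hm2 : c = p.2 := (Prod.ext_iff.mp hm).2
        have : pvRead? g r c = none := by
          unfold pvRead?; rw [hm1, hrow]; dsimp only; rw [hm2]; exact hv
        simp [this]
      · simp [hm]
    | some v =>
      rw [pvSet_point_mark g row p.1 p.2 h1 h2 hrow]
      congr 1
      funext r c
      by_cases hm : (r, c) = p
      · have hm1 : r = p.1 := (Prod.ext_iff.mp hm).1
        have hm2 : c = p.2 := (Prod.ext_iff.mp hm).2
        have hsome : pvRead? g p.1 p.2 = some v := by
          unfold pvRead?; rw [hrow]; dsimp only; exact hv
        simp [hm1, hm2, hsome]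
      · have hm' : ¬ (r = p.1 ∧ c = p.2) := fun hcon => hm (Prod.ext_iff.mpr hcon)
        simp [hm, hm']

lemma pvApply_mark (ch : List (Int × Int)) :
    ∀ (g : List (List Int)), (∀ p ∈ ch, 0 ≤ p.1 ∧ 0 ≤ p.2) →
    pvApply g ch = pvMark (fun r c => decide ((r, c) ∈ ch) && (pvRead? g r c).isSome) g := by
  induction ch with
  | nil =>
    intro g _
    rw [pvMark_of_false _ _ (fun r c => by simp)]
    rfl
  | cons p rest ih =>
    intro g h
    have hp := h p (by simp)
    have htail : ∀ q ∈ rest, 0 ≤ q.1 ∧ 0 ≤ q.2 := fun q hq => h q (by simp [hq])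
    show pvApply (pvSetOne g p) rest = _
    rw [ih (pvSetOne g p) htail, pvSetOne_mark g p hp.1 hp.2, pvMark_pvMark]
    apply pvMark_congr'
    intro r c row hrow hcl
    have hs : (pvRead? (pvMark (fun r c => decide ((r, c) = p) && (pvRead? g r c).isSome) g)
          (r : Int) (c : Int)).isSome = (pvRead? g (r : Int) (c : Int)).isSome := by
      rw [pvRead?_pvMark _ _ (Int.natCast_nonneg r) (Int.natCast_nonneg c)]
      exact Option.isSome_map
    by_cases h1 : (((r : Int), (c : Int)) : Int × Int) = p <;>
      by_cases h2 : (((r : Int), (c : Int)) : Int × Int) ∈ rest <;>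
      simp [h1, h2, hs]

-- ---- the invariant: the frontier is exactly the newest infected layer ----
def pvINV (ROW COL : Int) (g : List (List Int)) (fr : List (Int × Int)) : Prop :=
  (∀ p ∈ fr, pvOneAt ROW g p = true) ∧
  (∀ r c : Int, pvInb ROW COL r c = true → pvCellIsZero g r c = true →
     (pvNbrs (r, c)).any (pvOneAt ROW g) = true → ∃ p ∈ fr, p ∈ pvNbrs (r, c))

lemma pvWP_eq_pvQP (ROW COL : Int) (g : List (List Int)) (fr : List (Int × Int))
    (hINV : pvINV ROW COL g fr) (r c : Int) :
    pvWP ROW COL g fr r c = pvQP ROW COL g r c := by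
  obtain ⟨hfr, hcover⟩ := hINV
  by_cases hin : pvInb ROW COL r c = true
  · by_cases hz : pvCellIsZero g r c = true
    · have hkey : fr.any (fun p => decide ((r, c) ∈ pvNbrs p))
          = (pvNbrs (r, c)).any (pvOneAt ROW g) := by
        apply Bool.coe_iff_coe.mp
        simp only [List.any_eq_true, decide_eq_true_eq]
        constructor
        · rintro ⟨p, hp, hadj⟩
          exact ⟨p, (pvNbrs_symm p (r, c)).mp hadj, hfr p hp⟩
        · intro hex
          obtain ⟨p, hpfr, hpn⟩ := hcover r c hin hz
            (List.any_eq_true.mpr (by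
              obtain ⟨q, hq, hone⟩ := hex
              exact ⟨q, hq, hone⟩))
          exact ⟨p, hpfr, (pvNbrs_symm p (r, c)).mpr hpn⟩
      simp [pvWP, pvQP, hin, hz, hkey]
    · have hz' : pvCellIsZero g r c = false := by simpa using hz
      simp [pvWP, pvQP, hz']
  · have hin' : pvInb ROW COL r c = false := by simpa using hin
    simp [pvWP, pvQP, hin']

lemma pvINV_preserve (ROW COL : Int) (g : List (List Int)) (fr L : List (Int × Int))
    (hINV : pvINV ROW COL g fr)
    (hL : ∀ q : Int × Int, q ∈ L ↔ pvWP ROW COL g fr q.1 q.2 = true) :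
    pvINV ROW COL (pvMark (pvWP ROW COL g fr) g) L := by
  obtain ⟨hfr, hcover⟩ := hINV
  constructor
  · intro p hp
    have hS := (hL p).mp hp
    have hS' := hS
    simp only [pvWP, Bool.and_eq_true] at hS'
    obtain ⟨⟨-, hinb⟩, hz⟩ := hS'
    obtain ⟨hr, hrR, hc, -⟩ := (pvInb_iff ROW COL p.1 p.2).mp hinb
    rw [pvOneAt_iff]
    refine ⟨hr, hrR, hc, ?_⟩
    have hread : pvRead? g p.1 p.2 = some 0 := by
      rw [pvCellIsZero_eq] at hz; simpa using hz
    rw [pvRead?_pvMark _ _ hr hc, hread, Option.map_some, hS]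
    rfl
  · intro r c hin hz hany
    obtain ⟨hr, hrR, hc, hcC⟩ := (pvInb_iff ROW COL r c).mp hin
    have hzm := pvCellIsZero_pvMark (pvWP ROW COL g fr) g hr hc
    rw [hz] at hzm
    have hzg : pvCellIsZero g r c = true := by
      rcases hb : pvCellIsZero g r c with h | h
      · rw [hb] at hzm; cases hzm
      · rfl
    have hWrc : pvWP ROW COL g fr r c = false := by
      rcases hb : pvWP ROW COL g fr r c with h | h
      · rfl
      · rw [hb, hzg] at hzm; cases hzm
    obtain ⟨nb, hnbm, hone'⟩ := List.any_eq_true.mp hany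
    rw [pvOneAt_iff] at hone'
    obtain ⟨hn1, hn2, hn3, hnread⟩ := hone'
    rw [pvRead?_pvMark _ _ hn1 hn3] at hnread
    cases hgv : pvRead? g nb.1 nb.2 with
    | none => rw [hgv] at hnread; cases hnread
    | some v =>
      rw [hgv] at hnread
      simp only [Option.map_some, Option.some.injEq] at hnread
      by_cases hWn : pvWP ROW COL g fr nb.1 nb.2 = true
      · exact ⟨nb, (hL nb).mpr hWn, hnbm⟩
      · have hWn' : pvWP ROW COL g fr nb.1 nb.2 = false := by simpa using hWn
        rw [hWn'] at hnread
        simp only [Bool.false_eq_true, if_false] at hnread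
        have honeg : pvOneAt ROW g nb = true := by
          rw [pvOneAt_iff]
          exact ⟨hn1, hn2, hn3, by rw [hgv, hnread]⟩
        obtain ⟨p, hpfr, hpn⟩ := hcover r c hin hzg
          (List.any_eq_true.mpr ⟨nb, hnbm, honeg⟩)
        exfalso
        have : pvWP ROW COL g fr r c = true := by
          simp only [pvWP, Bool.and_eq_true, List.any_eq_true, decide_eq_true_eq]
          exact ⟨⟨⟨p, hpfr, (pvNbrs_symm p (r, c)).mpr hpn⟩, hin⟩, hzg⟩
        rw [hWrc] at this; cases this

lemma pvChanges_mem_QP (ROW COL : Int) (g : List (List Int)) (q : Int × Int) :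
    q ∈ pvChanges ROW COL g ↔ pvQP ROW COL g q.1 q.2 = true := by
  rw [pvChanges_mem]
  simp [pvQP, pvInb, and_assoc]

lemma pvFInit_mem (g : List (List Int)) (q : Int × Int) :
    q ∈ pvFInit g ↔ pvOneAt (g.length : Int) g q = true := by
  unfold pvFInit
  rw [pvOneAt_iff]
  simp only [List.mem_flatMap, List.mem_filterMap, PySem.List.mem_enumerate_iff]
  constructor
  · rintro ⟨rp, ⟨k, hk, hrp⟩, cp, ⟨j, hj, hcp⟩, hq⟩
    subst hrp; subst hcp
    split at hq
    · rename_i hone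
      cases hq
      dsimp only at hone hj ⊢
      refine ⟨by omega, by omega, by omega, ?_⟩
      unfold pvRead?
      rw [show ((0 : Int) + (k : Int)) = (k : Int) by omega, PySem.List.pyGet?_natCast,
        List.getElem?_eq_getElem hk]
      dsimp only
      rw [show ((0 : Int) + (j : Int)) = (j : Int) by omega, PySem.List.pyGet?_natCast,
        List.getElem?_eq_getElem hj, hone]
    · cases hq
  · rintro ⟨h1, h2, h3, hread⟩
    unfold pvRead? at hread
    cases hrow : PySem.List.pyGet? g q.1 with
    | none => rw [hrow] at hread; cases hread
    | some row =>
      rw [hrow] at hread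
      dsimp only at hread
      have hga : g[q.1.toNat]? = some row := pvGet_some_of_nonneg h1 hrow
      have hia : q.1.toNat < g.length := by
        by_contra hcon
        rw [List.getElem?_eq_none (by omega)] at hga; cases hga
      have hrow' : g[q.1.toNat]'hia = row := by
        have h := List.getElem?_eq_getElem hia
        rw [hga] at h
        exact (Option.some.injEq _ _).mp h.symm
      have hja := pvGet_some_of_nonneg h3 hread
      have hjb : q.2.toNat < row.length := by
        by_contra hcon
        rw [List.getElem?_eq_none (by omega)] at hja; cases hja
      have hrv : row[q.2.toNat]'hjb = 1 := by
        have h := List.getElem?_eq_getElem hjb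
        rw [hja] at h
        exact (Option.some.injEq _ _).mp h.symm
      refine ⟨(q.1, row), ⟨q.1.toNat, hia, Prod.ext_iff.mpr ⟨by dsimp only; omega, by
          dsimp only; rw [hrow']⟩⟩,
        (q.2, 1), ⟨q.2.toNat, hjb, Prod.ext_iff.mpr ⟨by dsimp only; omega, by
          dsimp only; rw [hrv]⟩⟩, ?_⟩
      rw [if_pos rfl]

lemma pvINV_init (COL : Int) (g : List (List Int)) :
    pvINV (g.length : Int) COL g (pvFInit g) := by
  constructor
  · intro p hp
    exact (pvFInit_mem g p).mp hp
  · intro r c _ _ hany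
    obtain ⟨nb, hnbm, hone⟩ := List.any_eq_true.mp hany
    exact ⟨nb, (pvFInit_mem g nb).mpr hone, hnbm⟩

-- ---- frontier BFS = synchronous simulation ----
lemma pvMainStep (ROW COL : Int) (g : List (List Int)) (fr : List (Int × Int)) (d : Int)
    (hinv : pvINV ROW COL g fr)
    (ih : ∀ (g' : List (List Int)) (fr' : List (Int × Int)) (d' : Int),
      pvZeros g' < pvZeros g → pvINV ROW COL g' fr' →
      pvFOuter ROW COL g' fr' d' = pvSyncOuter ROW COL g' d') :
    pvFOuter ROW COL g fr d = pvSyncOuter ROW COL g d := by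
  have hqp := fun r c => pvWP_eq_pvQP ROW COL g fr hinv r c
  cases fr with
  | nil =>
    have hch : pvChanges ROW COL g = [] := by
      rw [List.eq_nil_iff_forall_not_mem]
      intro q hq
      have hQ := (pvChanges_mem_QP ROW COL g q).mp hq
      rw [← hqp q.1 q.2] at hQ
      simp [pvWP] at hQ
    rw [pvFOuter.eq_def, pvSyncOuter.eq_def, dif_pos hch]
  | cons p cs =>
    obtain ⟨hw1, hw2⟩ := pvFWave_mark ROW COL (p :: cs) g []
    rw [pvFOuter.eq_def]
    dsimp only
    by_cases hemp : (pvFWave ROW COL g (p :: cs) []).2 = []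
    · have hWfalse : ∀ r c, pvWP ROW COL g (p :: cs) r c = false := by
        intro r c
        rcases hb : pvWP ROW COL g (p :: cs) r c with h | h
        · rfl
        · exfalso
          have : ((r, c) : Int × Int) ∈ (pvFWave ROW COL g (p :: cs) []).2 :=
            (hw2 (r, c)).mpr (Or.inr hb)
          rw [hemp] at this
          cases this
      have hgm : (pvFWave ROW COL g (p :: cs) []).1 = g := by
        rw [hw1, pvMark_of_false _ _ hWfalse]
      have hch : pvChanges ROW COL g = [] := by
        rw [List.eq_nil_iff_forall_not_mem]
        intro q hq
        have hQ := (pvChanges_mem_QP ROW COL g q).mp hq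
        rw [← hqp q.1 q.2, hWfalse q.1 q.2] at hQ
        cases hQ
      rw [dif_pos (by rw [hemp]; rfl), hgm, pvSyncOuter.eq_def, dif_pos hch]
    · have hchne : pvChanges ROW COL g ≠ [] := by
        obtain ⟨q, hq⟩ := List.exists_mem_of_ne_nil _ hemp
        have hWq : pvWP ROW COL g (p :: cs) q.1 q.2 = true :=
          ((hw2 q).mp hq).resolve_left (by simp)
        intro hch0
        have : q ∈ pvChanges ROW COL g := by
          rw [pvChanges_mem_QP, ← hqp q.1 q.2]
          exact hWq
        rw [hch0] at this
        cases this
      rw [dif_neg (by simpa [List.isEmpty_iff] using hemp)]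
      rw [pvSyncOuter.eq_def, dif_neg hchne]
      have happly : pvApply g (pvChanges ROW COL g) = (pvFWave ROW COL g (p :: cs) []).1 := by
        rw [hw1]
        rw [pvApply_mark _ g (fun q hq => by
          have := (pvChanges_mem ROW COL g q).mp hq
          exact ⟨this.1, this.2.2.1⟩)]
        congr 1
        funext r c
        have hmemd : decide ((r, c) ∈ pvChanges ROW COL g) = pvQP ROW COL g r c :=
          Bool.coe_iff_coe.mp (by rw [decide_eq_true_eq]; exact pvChanges_mem_QP ROW COL g (r, c))
        rw [hmemd, ← hqp r c]
        by_cases hW : pvWP ROW COL g (p :: cs) r c = true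
        · have hz : pvCellIsZero g r c = true := by
            simp only [pvWP, Bool.and_eq_true] at hW
            exact hW.2
          have hsome : (pvRead? g r c).isSome = true := by
            rw [pvCellIsZero_eq] at hz
            cases hv : pvRead? g r c with
            | none => rw [hv] at hz; cases hz
            | some v => rfl
          rw [hW, hsome]
          rfl
        · have hW' : pvWP ROW COL g (p :: cs) r c = false := by simpa using hW
          rw [hW']
          rfl
      rw [happly]
      have hzlt : pvZeros (pvFWave ROW COL g (p :: cs) []).1 < pvZeros g := by
        have hz := pvFWave_zeros ROW COL (p :: cs) g []
        cases hx : (pvFWave ROW COL g (p :: cs) []).2 with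
        | nil => exact absurd hx hemp
        | cons a b =>
          rw [hx] at hz
          simp only [List.length_cons, List.length_nil, Nat.add_zero] at hz
          omega
      exact ih _ _ _ hzlt (by
        rw [hw1]
        exact pvINV_preserve ROW COL g (p :: cs) (pvFWave ROW COL g (p :: cs) []).2 hinv
          (fun q => by rw [hw2 q]; simp))

lemma pvMain (ROW COL : Int) : ∀ (n : Nat) (g : List (List Int)) (fr : List (Int × Int)) (d : Int),
    pvZeros g ≤ n → pvINV ROW COL g fr →
    pvFOuter ROW COL g fr d = pvSyncOuter ROW COL g d := by
  intro n
  induction n with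
  | zero =>
    intro g fr d hzn hinv
    exact pvMainStep ROW COL g fr d hinv (fun g' fr' d' hlt hinv' => absurd hlt (by omega))
  | succ n ih =>
    intro g fr d hzn hinv
    exact pvMainStep ROW COL g fr d hinv
      (fun g' fr' d' hlt hinv' => ih g' fr' d' (by omega) hinv')

-- ===== VERDICT (by name: the statement is the Claim_ definition above) =====
theorem zombieMatrix_spec : Claim_equal_zombieMatrix := by
  intro grid _ _
  unfold Spec_zombieMatrix zombieMatrix zombieMatrix_alt
  rw [init_bridge]
  rw [outer_loop _ _ (pvZeros grid) grid (pvFInit grid) 0 0 le_rfl (fun _ => rfl)]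
  exact pvMain _ _ (pvZeros grid) grid (pvFInit grid) 0 le_rfl
    (pvINV_init ((grid.headD []).length : Int) grid)
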